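-- pv_equiv track=rewrite | github.com/ArcticXWolf/adventofcode2021 | day13/code.py | get_grid_str
-- ===== SOURCE A (Python) =====
-- from typing import Dict, Generator, List, Set, Tuple
--
-- def get_grid_str(grid: Set[Tuple[int, int]]) -> str:
--     width = max([x for x, _ in grid]) + 1
--     height = max([y for _, y in grid]) + 1
--
--     text = ""
--     for y in range(height):
--         for x in range(width):
--             if (x, y) in grid:
--                 text = f"{text}#"
--                 continue
--             text = f"{text}."
--         text = f"{text}\n"
--
--     return text
-- ===== SOURCE B (Python) =====
-- def get_grid_str(grid):
--     width = max(x for x, _ in grid) + 1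
--     height = max(y for _, y in grid) + 1
--
--     canvas = [["."] * width for _ in range(height)]
--     for x, y in grid:
--         if 0 <= x < width and 0 <= y < height:
--             canvas[y][x] = "#"
--
--     return "".join("".join(row) + "\n" for row in canvas)
-- ===== Notes on version B (the rewrite author's own statement) =====
-- stated objective: faster
-- what changed: B replaces A's per-cell membership scan of the point list and repeated string concatenation with a pre-allocated 2D canvas that is stamped once per point (with an explicit bounds guard for negative coordinates) and joined into the result string at the end.
-- outside the precondition, e.g. on get_grid_str(set()): A raises ValueError, B raises ValueError
import Mathlib
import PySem

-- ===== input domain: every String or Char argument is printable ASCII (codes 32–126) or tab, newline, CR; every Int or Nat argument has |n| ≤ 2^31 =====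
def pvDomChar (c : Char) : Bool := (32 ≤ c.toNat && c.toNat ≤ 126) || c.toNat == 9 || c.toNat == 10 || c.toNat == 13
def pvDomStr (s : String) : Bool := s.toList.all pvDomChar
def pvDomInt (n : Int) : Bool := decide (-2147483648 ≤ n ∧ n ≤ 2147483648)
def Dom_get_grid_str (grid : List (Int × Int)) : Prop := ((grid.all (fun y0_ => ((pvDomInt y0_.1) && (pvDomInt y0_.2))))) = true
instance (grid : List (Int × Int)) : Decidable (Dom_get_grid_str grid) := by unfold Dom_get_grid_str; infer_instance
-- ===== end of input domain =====

-- B replaces A's per-cell membership scan and repeated string concatenation by a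
-- pre-allocated 2D canvas stamped once per point and joined at the end (objective: faster).

-- ===== PORT A =====
-- A, literally: width/height from max()+1, then nested loops over range(height)/range(width)
-- appending '#' or '.' per cell and '\n' per row.  max() of an empty set raises → the
-- `none` branches are unreachable under Pre_.
def get_grid_str (grid : List (Int × Int)) : String :=
  match PySem.List.max? (grid.map Prod.fst) (fun x => x),
        PySem.List.max? (grid.map Prod.snd) (fun y => y) with
  | some mx, some my =>
    let width := mx + 1
    let height := my + 1
    let text : List Char :=
      (PySem.List.pyRange 0 height 1).foldl (fun text y =>
        ((PySem.List.pyRange 0 width 1).foldl (fun t x =>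
          if (x, y) ∈ grid then t ++ ['#'] else t ++ ['.']) text) ++ ['\n']) []
    String.ofList text
  | _, _ => ""

-- ===== PORT B =====
-- loop body of B's single pass over the points: stamp '#' on the canvas if in bounds
def pvStamp (width height : Int) (cv : List (List Char)) (p : Int × Int) : List (List Char) :=
  if 0 ≤ p.1 ∧ p.1 < width ∧ 0 ≤ p.2 ∧ p.2 < height then
    cv.modify p.2.toNat (fun row => row.set p.1.toNat '#')
  else cv

def get_grid_str_alt (grid : List (Int × Int)) : String :=
  match PySem.List.max? (grid.map Prod.fst) (fun x => x) with
  | none => ""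
  | some mx =>
    match PySem.List.max? (grid.map Prod.snd) (fun y => y) with
    | none => ""
    | some my =>
      let width := mx + 1
      let height := my + 1
      let canvas : List (List Char) := List.replicate height.toNat (List.replicate width.toNat '.')
      let canvas := grid.foldl (pvStamp width height) canvas
      String.ofList ((canvas.map (fun row => row ++ ['\n'])).flatten)

-- ===== PRECONDITION & SPEC =====
-- Pre_ excludes only the empty grid, on which Python's max([]) raises ValueError (in A and in B).
def Pre_get_grid_str (grid : List (Int × Int)) : Prop := grid ≠ []
instance (grid : List (Int × Int)) : Decidable (Pre_get_grid_str grid) := by unfold Pre_get_grid_str; infer_instance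
def pvWitness_get_grid_str : (List (Int × Int)) := [((0 : Int), (0 : Int)), ((2 : Int), (1 : Int))]
def Spec_get_grid_str (grid : List (Int × Int)) (out : String) : Prop := out = get_grid_str_alt grid
instance (grid : List (Int × Int)) (out : String) : Decidable (Spec_get_grid_str grid out) := by unfold Spec_get_grid_str; infer_instance

-- ===== CLAIM (what is proved, stated in full; the proofs are below) =====
def Claim_equal_get_grid_str : Prop := ∀ (grid : List (Int × Int)), Dom_get_grid_str grid → Pre_get_grid_str grid → Spec_get_grid_str grid (get_grid_str grid)

-- ===== LEMMAS AND PROOFS =====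

theorem pvStamp_length (width height : Int) (cv : List (List Char)) (p : Int × Int) :
    (pvStamp width height cv p).length = cv.length := by
  unfold pvStamp; split <;> simp

theorem foldl_pvStamp_length (width height : Int) (g : List (Int × Int)) (cv : List (List Char)) :
    (g.foldl (pvStamp width height) cv).length = cv.length := by
  induction g generalizing cv with
  | nil => rfl
  | cons p t ih => simpa [pvStamp_length] using ih (pvStamp width height cv p)

theorem pvStamp_rows (width height : Int) (cv : List (List Char)) (p : Int × Int) (W : Nat)
    (hW : ∀ row ∈ cv, row.length = W) :
    ∀ row ∈ pvStamp width height cv p, row.length = W := by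
  unfold pvStamp; split
  · intro row hrow
    obtain ⟨k, hk, rfl⟩ := List.mem_iff_getElem.mp hrow
    have hk' : k < cv.length := by simpa using hk
    rw [List.getElem_modify]
    split
    · simpa using hW _ (List.getElem_mem hk')
    · exact hW _ (List.getElem_mem hk')
  · exact hW

theorem foldl_pvStamp_rows (width height : Int) (g : List (Int × Int)) (cv : List (List Char)) (W : Nat)
    (hW : ∀ row ∈ cv, row.length = W) :
    ∀ row ∈ g.foldl (pvStamp width height) cv, row.length = W := by
  induction g generalizing cv with
  | nil => exact hW
  | cons p t ih => exact ih _ (pvStamp_rows width height cv p W hW)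

-- cell characterisation of B's canvas fold
theorem foldl_pvStamp_cell (width height : Int) (g : List (Int × Int))
    (cv : List (List Char)) (W : Nat) (hW : ∀ row ∈ cv, row.length = W)
    (j i : Nat) (hj : j < cv.length) (hi : i < W)
    (hiw : (i : Int) < width) (hjh : (j : Int) < height) :
    ((g.foldl (pvStamp width height) cv)[j]?.bind (fun row => row[i]?)) =
      if ((i : Int), (j : Int)) ∈ g then some '#'
      else cv[j]?.bind (fun row => row[i]?) := by
  induction g generalizing cv with
  | nil => simp
  | cons p t ih =>
    have hlen := pvStamp_length width height cv p
    have hrows := pvStamp_rows width height cv p W hW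
    rw [List.foldl_cons, ih (pvStamp width height cv p) hrows (by omega)]
    by_cases hpij : p = ((i : Int), (j : Int))
    · subst hpij
      have hg : 0 ≤ (i : Int) ∧ (i : Int) < width ∧ 0 ≤ (j : Int) ∧ (j : Int) < height := by
        refine ⟨by positivity, hiw, by positivity, hjh⟩
      by_cases hmem : ((i : Int), (j : Int)) ∈ t
      · simp [hmem]
      · simp only [List.mem_cons, hmem, or_false, if_true, if_false]
        unfold pvStamp
        rw [if_pos hg]
        simp only [Int.toNat_natCast, List.getElem?_modify]
        rw [List.getElem?_eq_getElem hj]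
        have hrow : (cv[j]'hj).length = W := hW _ (List.getElem_mem hj)
        simp [hrow, hi]
    · have hstep : (pvStamp width height cv p)[j]?.bind (fun row => row[i]?) =
          cv[j]?.bind (fun row => row[i]?) := by
        unfold pvStamp
        split
        · rename_i hg
          rw [List.getElem?_modify]
          by_cases hjj : p.2.toNat = j
          · have hii : p.1.toNat ≠ i := by
              intro hii
              apply hpij
              have := hg.1; have := hg.2.2.1
              have h1 : p.1 = (i : Int) := by omega
              have h2 : p.2 = (j : Int) := by omega
              exact Prod.ext h1 h2
            simp only [hjj]
            cases hcj : cv[j]? with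
            | none => rfl
            | some row => simp [List.getElem?_set_ne hii]
          · simp [hjj]
        · rfl
      rw [hstep]
      have hne : (((i : Int), (j : Int)) ∈ p :: t) ↔ (((i : Int), (j : Int)) ∈ t) := by
        simp only [List.mem_cons]
        constructor
        · rintro (h | h)
          · exact absurd h.symm hpij
          · exact h
        · exact Or.inr
      by_cases hmem : ((i : Int), (j : Int)) ∈ t <;> simp [hne, hmem]

-- B's canvas, row by row, is exactly A's row comprehension
theorem canvas_eq_map (width height : Int) (g : List (Int × Int)) :
    g.foldl (pvStamp width height) (List.replicate height.toNat (List.replicate width.toNat '.')) =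
      (PySem.List.pyRange 0 height 1).map (fun y =>
        (PySem.List.pyRange 0 width 1).map (fun x => if (x, y) ∈ g then '#' else '.')) := by
  set cv0 : List (List Char) := List.replicate height.toNat (List.replicate width.toNat '.') with hcv0
  have hW : ∀ row ∈ cv0, row.length = width.toNat := by
    intro row hrow
    rw [hcv0] at hrow
    simp [List.eq_of_mem_replicate hrow]
  apply List.ext_getElem?
  intro j
  by_cases hj : j < height.toNat
  · have hjlen : j < cv0.length := by simp [hcv0, hj]
    have hjh : (j : Int) < height := by omega
    have hLlen : j < ((PySem.List.pyRange 0 height 1).map (fun y =>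
        (PySem.List.pyRange 0 width 1).map (fun x => if (x, y) ∈ g then '#' else '.'))).length := by
      simp [PySem.List.length_pyRange_one]; omega
    rw [List.getElem?_eq_getElem hLlen]
    have hcanlen : j < (g.foldl (pvStamp width height) cv0).length := by
      rw [foldl_pvStamp_length]; exact hjlen
    rw [List.getElem?_eq_getElem hcanlen]
    congr 1
    -- both sides are rows; compare entrywise
    apply List.ext_getElem?
    intro i
    have hrowlen : ((g.foldl (pvStamp width height) cv0)[j]).length = width.toNat :=
      foldl_pvStamp_rows width height g cv0 width.toNat hW _ (List.getElem_mem hcanlen)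
    by_cases hi : i < width.toNat
    · have hiw : (i : Int) < width := by omega
      have hcell := foldl_pvStamp_cell width height g cv0 width.toNat hW j i hjlen hi hiw hjh
      rw [List.getElem?_eq_getElem hcanlen] at hcell
      simp only [Option.bind_some] at hcell
      rw [hcell]
      have hrhs : ((PySem.List.pyRange 0 height 1).map (fun y =>
          (PySem.List.pyRange 0 width 1).map (fun x => if (x, y) ∈ g then '#' else '.')))[j] =
          (PySem.List.pyRange 0 width 1).map
            (fun x => if (x, (j : Int)) ∈ g then '#' else '.') := by
        rw [List.getElem_map]
        congr 1
        have := PySem.List.getElem_pyRange_one (a := 0) (b := height) (k := j)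
          (by simp [PySem.List.length_pyRange_one]; omega)
        simpa using this
      rw [hrhs]
      have hilen : i < ((PySem.List.pyRange 0 width 1).map
          (fun x => if (x, (j : Int)) ∈ g then '#' else '.')).length := by
        simp [PySem.List.length_pyRange_one]; omega
      rw [List.getElem?_eq_getElem hilen, List.getElem_map]
      have hx : (PySem.List.pyRange 0 width 1)[i]'(by simpa [PySem.List.length_pyRange_one] using hilen) = (i : Int) := by
        have := PySem.List.getElem_pyRange_one (a := 0) (b := width) (k := i)
          (by simp [PySem.List.length_pyRange_one]; omega)
        simpa using this
      rw [hx]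
      -- the base canvas entry is '.'
      by_cases hmem : ((i : Int), (j : Int)) ∈ g
      · simp [hmem]
      · simp only [hmem, if_false]
        rw [List.getElem?_eq_getElem hjlen]
        simp only [Option.bind_some]
        have : cv0[j] = List.replicate width.toNat '.' := by
          simp [hcv0]
        rw [this]
        simp [hi]
    · -- out of range on both sides
      have h1 : ((g.foldl (pvStamp width height) cv0)[j])[i]? = none := by
        rw [List.getElem?_eq_none]; omega
      have h2 : ((PySem.List.pyRange 0 width 1).map
          (fun x => if (x, (j:Int)) ∈ g then '#' else '.'))[i]? = none := by
        rw [List.getElem?_eq_none]; simp [PySem.List.length_pyRange_one]; omega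
      rw [h1]
      have hrhs : ((PySem.List.pyRange 0 height 1).map (fun y =>
          (PySem.List.pyRange 0 width 1).map (fun x => if (x, y) ∈ g then '#' else '.')))[j] =
          (PySem.List.pyRange 0 width 1).map
            (fun x => if (x, (j : Int)) ∈ g then '#' else '.') := by
        rw [List.getElem_map]
        congr 1
        have := PySem.List.getElem_pyRange_one (a := 0) (b := height) (k := j)
          (by simp [PySem.List.length_pyRange_one]; omega)
        simpa using this
      rw [hrhs, h2]
  · have h1 : (g.foldl (pvStamp width height) cv0)[j]? = none := by
      rw [List.getElem?_eq_none]
      rw [foldl_pvStamp_length]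
      simp [hcv0]; omega
    have h2 : ((PySem.List.pyRange 0 height 1).map (fun y =>
        (PySem.List.pyRange 0 width 1).map (fun x => if (x, y) ∈ g then '#' else '.')))[j]? = none := by
      rw [List.getElem?_eq_none]
      simp [PySem.List.length_pyRange_one]; omega
    rw [h1, h2]

-- A's nested append loops flatten to the same row maps
theorem textA_eq (width height : Int) (g : List (Int × Int)) :
    (PySem.List.pyRange 0 height 1).foldl (fun text y =>
        ((PySem.List.pyRange 0 width 1).foldl (fun t x =>
          if (x, y) ∈ g then t ++ ['#'] else t ++ ['.']) text) ++ ['\n']) [] =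
      ((PySem.List.pyRange 0 height 1).map (fun y =>
        ((PySem.List.pyRange 0 width 1).map (fun x => if (x, y) ∈ g then '#' else '.')) ++ ['\n'])).flatten := by
  have hinner : ∀ (y : Int) (text : List Char),
      (PySem.List.pyRange 0 width 1).foldl (fun t x =>
        if (x, y) ∈ g then t ++ ['#'] else t ++ ['.']) text =
      text ++ (PySem.List.pyRange 0 width 1).map (fun x => if (x, y) ∈ g then '#' else '.') := by
    intro y text
    have hfun : (fun (t : List Char) x => if (x, y) ∈ g then t ++ ['#'] else t ++ ['.']) =
        (fun t x => t ++ [if (x, y) ∈ g then '#' else '.']) := by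
      funext t x; split <;> rfl
    rw [hfun, PySem.List.foldl_append_singleton_eq_map]
  have houter : (fun (text : List Char) y =>
      ((PySem.List.pyRange 0 width 1).foldl (fun t x =>
        if (x, y) ∈ g then t ++ ['#'] else t ++ ['.']) text) ++ ['\n']) =
      (fun text y => text ++
        (((PySem.List.pyRange 0 width 1).map (fun x => if (x, y) ∈ g then '#' else '.')) ++ ['\n'])) := by
    funext text y
    rw [hinner, List.append_assoc]
  rw [houter, PySem.List.foldl_append_eq_flatMap]
  simp [List.flatMap_def]

-- ===== VERDICT (by name: the statement is the Claim_ definition above) =====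
theorem get_grid_str_spec : Claim_equal_get_grid_str := by
  intro grid _ hpre
  unfold Spec_get_grid_str get_grid_str get_grid_str_alt
  have hfst : grid.map Prod.fst ≠ [] := by simpa using hpre
  have hsnd : grid.map Prod.snd ≠ [] := by simpa using hpre
  obtain ⟨mx, hmx⟩ := Option.ne_none_iff_exists'.mp
    (fun h => hfst ((PySem.List.max?_eq_none_iff (grid.map Prod.fst) (fun x => x)).mp h))
  obtain ⟨my, hmy⟩ := Option.ne_none_iff_exists'.mp
    (fun h => hsnd ((PySem.List.max?_eq_none_iff (grid.map Prod.snd) (fun y => y)).mp h))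
  rw [hmx, hmy]
  simp only
  rw [canvas_eq_map (mx + 1) (my + 1) grid, textA_eq (mx + 1) (my + 1) grid]
  rw [List.map_map]
  rfl
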